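-- pv_equiv track=rewrite | github.com/sueszli/vector-database-benchmark | dataset/python-mutated/test_row_col_subplot_addressing.py | _sort_row_col_lists
-- ===== SOURCE A (Python) =====
-- def _sort_row_col_lists(rows, cols):
--     if False:
--         while True:
--             i = 10
--     si = sorted(range(len(rows)), key=lambda i: rows[i])
--     rows = [rows[i] for i in si]
--     cols = [cols[i] for i in si]
--     return (rows, cols)
-- ===== SOURCE B (Python) =====
-- def _sort_row_col_lists(rows, cols):
--     # Bucket the col values by their row key, then emit buckets in increasing
--     # key order; stability is by construction (buckets keep original order).
--     groups = {}
--     for r, c in zip(rows, cols):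
--         groups.setdefault(r, []).append(c)
--     out_rows, out_cols = [], []
--     for r in sorted(groups):
--         cs = groups[r]
--         out_rows.extend([r] * len(cs))
--         out_cols.extend(cs)
--     return (out_rows, out_cols)
-- ===== Notes on version B (the rewrite author's own statement) =====
-- stated objective: alternative
-- what changed: B does no general sort at all: it buckets the cols by row key in a dict in one pass, sorts only the distinct keys, and concatenates the buckets in key order, instead of A's argsort of an index permutation indexed back into both lists.
import Mathlib
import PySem

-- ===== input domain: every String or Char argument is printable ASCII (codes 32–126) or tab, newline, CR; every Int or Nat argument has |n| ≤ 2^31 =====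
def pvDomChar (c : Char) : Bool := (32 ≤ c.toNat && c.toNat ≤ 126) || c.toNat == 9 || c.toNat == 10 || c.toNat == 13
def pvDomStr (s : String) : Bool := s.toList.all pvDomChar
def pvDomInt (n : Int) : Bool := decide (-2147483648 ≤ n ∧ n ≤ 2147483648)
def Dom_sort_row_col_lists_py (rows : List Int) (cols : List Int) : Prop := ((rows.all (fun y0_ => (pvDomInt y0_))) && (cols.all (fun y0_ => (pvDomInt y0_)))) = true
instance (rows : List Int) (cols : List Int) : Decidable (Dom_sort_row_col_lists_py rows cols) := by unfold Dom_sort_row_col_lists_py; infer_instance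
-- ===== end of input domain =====

-- B replaces A's argsort (sort an index permutation, index back into both lists) by a
-- bucket/group-by scheme: one pass building a dict row-key -> its cols, then the
-- buckets are emitted in increasing key order (only the distinct keys are sorted).

-- ===== PORT A =====
-- si = sorted(range(len(rows)), key=lambda i: rows[i]); indexing rows[i]/cols[i] is
-- PySem.List.pyGetD … i 0: every i ∈ si is a valid index of rows, and Pre_ guarantees
-- it is a valid index of cols (otherwise Python raises IndexError).
def sort_row_col_lists_py (rows : List Int) (cols : List Int) : List Int × List Int :=
  let si := PySem.List.sorted (PySem.List.pyRange 0 (PySem.List.len rows)) (fun i => PySem.List.pyGetD rows i 0)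
  (si.map (fun i => PySem.List.pyGetD rows i 0), si.map (fun i => PySem.List.pyGetD cols i 0))

-- ===== PORT B =====
-- groups = {}; for r, c in zip(rows, cols): groups.setdefault(r, []).append(c)
-- then for r in sorted(groups): out_rows += [r] * len(cs); out_cols += cs.
-- (sorted(groups) iterates the dict's keys, which PySem.Dict.keys models exactly.)
def sort_row_col_lists_py_alt (rows : List Int) (cols : List Int) : List Int × List Int :=
  let groups : PySem.Dict Int (List Int) :=
    (rows.zip cols).foldl (fun d p => d.modify p.1 [] (fun l => l ++ [p.2])) PySem.Dict.empty
  let keys := PySem.List.sorted (PySem.Dict.keys groups) (fun x => x)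
  keys.foldl (fun (acc : List Int × List Int) r =>
      let cs := groups.getD r []
      (acc.1 ++ List.replicate cs.length r, acc.2 ++ cs)) ([], [])

-- ===== PRECONDITION & SPEC =====
-- A raises IndexError when cols is shorter than rows (cols[i] with i up to len(rows)-1).
def Pre_sort_row_col_lists_py (rows : List Int) (cols : List Int) : Prop :=
  rows.length ≤ cols.length
instance (rows : List Int) (cols : List Int) : Decidable (Pre_sort_row_col_lists_py rows cols) := by unfold Pre_sort_row_col_lists_py; infer_instance

def pvWitness_sort_row_col_lists_py : List Int × List Int := ([3, 1, 2], [10, 20, 30])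

def Spec_sort_row_col_lists_py (rows : List Int) (cols : List Int) (out : List Int × List Int) : Prop := out = sort_row_col_lists_py_alt rows cols
instance (rows : List Int) (cols : List Int) (out : List Int × List Int) : Decidable (Spec_sort_row_col_lists_py rows cols out) := by unfold Spec_sort_row_col_lists_py; infer_instance

-- ===== CLAIM (what is proved, stated in full; the proofs are below) =====
def Claim_equal_sort_row_col_lists_py : Prop := ∀ (rows : List Int) (cols : List Int), Dom_sort_row_col_lists_py rows cols → Pre_sort_row_col_lists_py rows cols → Spec_sort_row_col_lists_py rows cols (sort_row_col_lists_py rows cols)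

-- ===== LEMMAS AND PROOFS =====

-- The grouped form both sides are reduced to: buckets of l in increasing key order.
def grp (l : List (Int × Int)) : List (Int × Int) :=
  (PySem.List.sorted (PySem.Set.ofList (l.map Prod.fst)) (fun x => x)).flatMap
    (fun k => l.filter (fun p => p.1 == k))

-- ---- A side: sorted index permutation = the stable sort of the zipped pairs ----
theorem zip_eq_map_range (xs ys : List Int) (h : xs.length ≤ ys.length) :
    xs.zip ys = (List.range xs.length).map (fun j => (xs.getD j 0, ys.getD j 0)) := by
  apply List.ext_getElem
  · simp [h]
  · intro i h1 h2
    simp at h1 ⊢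
    constructor <;> (rw [List.getElem?_eq_getElem (by omega)]; rfl)

theorem insertBy_map {α β : Type} (f : α → β) (bf : β → β → Bool) (x : α) (l : List α) :
    PySem.List.insertBy bf (f x) (l.map f)
      = (PySem.List.insertBy (fun a b => bf (f a) (f b)) x l).map f := by
  induction l with
  | nil => simp [PySem.List.insertBy]
  | cons y t ih => simp [PySem.List.insertBy]; split_ifs <;> simp [ih]

theorem sorted_map {α β κ : Type} [LinearOrder κ] (f : α → β) (key : β → κ) (l : List α) :
    PySem.List.sorted (l.map f) key = (PySem.List.sorted l (fun x => key (f x))).map f := by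
  rw [PySem.List.sorted_eq_foldl_insertBy, PySem.List.sorted_eq_foldl_insertBy, List.foldl_map]
  have h : ∀ (l : List α) (acc : List α),
      List.foldl (fun acc x => PySem.List.insertBy (fun a b => decide (key a < key b)) (f x) acc) (acc.map f) l
        = (List.foldl (fun acc x => PySem.List.insertBy (fun a b => decide (key (f a) < key (f b))) x acc) acc l).map f := by
    intro l
    induction l with
    | nil => simp
    | cons y t ih => intro acc; simp only [List.foldl_cons, insertBy_map f, ih]
  simpa using h l []

-- ---- stability of the sort: filtering one key class commutes with sorting ----
theorem filter_insertBy_sorted (x : Int × Int) (acc : List (Int × Int))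
    (h : acc.Pairwise (fun a b => a.1 ≤ b.1)) (k : Int) :
    (PySem.List.insertBy (fun a b => decide (a.1 < b.1)) x acc).filter (fun p => p.1 == k)
      = if x.1 = k then acc.filter (fun p => p.1 == k) ++ [x]
        else acc.filter (fun p => p.1 == k) := by
  induction acc with
  | nil => by_cases hxk : x.1 = k <;> simp [PySem.List.insertBy, hxk]
  | cons y t ih =>
    rw [List.pairwise_cons] at h
    obtain ⟨hy, ht⟩ := h
    simp only [PySem.List.insertBy]
    by_cases hxy : x.1 < y.1
    · rw [if_pos (by simpa using hxy)]
      by_cases hxk : x.1 = k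
      · have htk : t.filter (fun p => p.1 == k) = [] := by
          rw [List.filter_eq_nil_iff]; intro a ha; have := hy a ha; simp; omega
        have hyk : ¬ y.1 = k := by omega
        simp [hxk, hyk, htk]
      · simp [List.filter_cons, hxk]
    · rw [if_neg (by simpa using hxy)]
      rw [List.filter_cons, List.filter_cons, ih ht]
      by_cases hyk : y.1 = k <;> by_cases hxk : x.1 = k <;> simp [hxk, hyk]

theorem filter_sorted_key (l : List (Int × Int)) (k : Int) :
    (PySem.List.sorted l (fun p => p.1)).filter (fun p => p.1 == k)
      = l.filter (fun p => p.1 == k) := by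
  induction l using List.reverseRecOn with
  | nil => simp [PySem.List.sorted_eq_foldl_insertBy]
  | append_singleton l x ih =>
    have hstep : PySem.List.sorted (l ++ [x]) (fun p => p.1)
        = PySem.List.insertBy (fun a b => decide (a.1 < b.1)) x
            (PySem.List.sorted l (fun p => p.1)) := by
      rw [PySem.List.sorted_eq_foldl_insertBy, PySem.List.sorted_eq_foldl_insertBy,
          List.foldl_append, List.foldl_cons, List.foldl_nil]
    rw [hstep, filter_insertBy_sorted _ _ (PySem.List.sorted_pairwise l (fun p => p.1)) k,
        List.filter_append, ih]
    by_cases hxk : x.1 = k <;> simp [hxk]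

-- ---- uniqueness of a stable sort: same key classes + both key-sorted ⇒ equal ----
theorem stable_unique (l₁ : List (Int × Int)) :
    ∀ (l₂ : List (Int × Int)),
      (∀ k, l₁.filter (fun p => p.1 == k) = l₂.filter (fun p => p.1 == k)) →
      l₁.Pairwise (fun a b => a.1 ≤ b.1) → l₂.Pairwise (fun a b => a.1 ≤ b.1) → l₁ = l₂ := by
  induction l₁ with
  | nil =>
    intro l₂ hf _ _
    cases l₂ with
    | nil => rfl
    | cons y s => have := hf y.1; simp at this
  | cons x t ih =>
    intro l₂ hf h₁ h₂
    cases l₂ with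
    | nil => have := hf x.1; simp at this
    | cons y s =>
      rw [List.pairwise_cons] at h₁ h₂
      obtain ⟨hx, ht⟩ := h₁
      obtain ⟨hy, hs⟩ := h₂
      have hxy : x.1 = y.1 := by
        rcases lt_trichotomy x.1 y.1 with hlt | heq | hgt
        · exfalso
          have := hf x.1
          rw [List.filter_cons, List.filter_cons] at this
          have hyk : ¬ (y.1 == x.1) = true := by simp; omega
          have hsk : s.filter (fun p => p.1 == x.1) = [] := by
            rw [List.filter_eq_nil_iff]; intro a ha; have := hy a ha; simp; omega
          simp [hyk, hsk] at this
        · exact heq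
        · exfalso
          have := hf y.1
          rw [List.filter_cons, List.filter_cons] at this
          have hxk : ¬ (x.1 == y.1) = true := by simp; omega
          have htk : t.filter (fun p => p.1 == y.1) = [] := by
            rw [List.filter_eq_nil_iff]; intro a ha; have := hx a ha; simp; omega
          simp [hxk, htk] at this
      have hhead := hf x.1
      rw [List.filter_cons, List.filter_cons] at hhead
      simp [hxy] at hhead
      obtain ⟨hxe, htail⟩ := hhead
      have hfil : ∀ k, t.filter (fun p => p.1 == k) = s.filter (fun p => p.1 == k) := by
        intro k
        by_cases hk : k = y.1
        · subst hk; exact htail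
        · have := hf k
          rw [List.filter_cons, List.filter_cons] at this
          have h1 : ¬ (x.1 == k) = true := by simp; omega
          have h2 : ¬ (y.1 == k) = true := by simp; omega
          simpa [h1, h2] using this
      rw [hxe, ih s hfil ht hs]

-- ---- properties of the grouped form ----
theorem flatMap_filter_pairwise (l : List (Int × Int)) (keys : List Int)
    (h : keys.Pairwise (· < ·)) :
    (keys.flatMap (fun k => l.filter (fun p => p.1 == k))).Pairwise (fun a b => a.1 ≤ b.1) := by
  induction keys with
  | nil => simp
  | cons k ks ih =>
    rw [List.pairwise_cons] at h
    obtain ⟨hk, hks⟩ := h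
    rw [List.flatMap_cons, List.pairwise_append]
    refine ⟨?_, ih hks, ?_⟩
    · apply List.pairwise_of_forall_mem_list
      intro a ha b hb
      have ha' := (List.mem_filter.mp ha).2
      have hb' := (List.mem_filter.mp hb).2
      simp at ha' hb'; omega
    · intro a ha b hb
      have ha' := (List.mem_filter.mp ha).2
      obtain ⟨k', hk', hbk'⟩ := List.mem_flatMap.mp hb
      have hb' := (List.mem_filter.mp hbk').2
      have := hk k' hk'
      simp at ha' hb'; omega

theorem filter_flatMap_nodup (l : List (Int × Int)) (keys : List Int) (hnd : keys.Nodup) (k : Int) :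
    (keys.flatMap (fun k' => l.filter (fun p => p.1 == k'))).filter (fun p => p.1 == k)
      = if k ∈ keys then l.filter (fun p => p.1 == k) else [] := by
  induction keys with
  | nil => simp
  | cons k' ks ih =>
    rw [List.nodup_cons] at hnd
    obtain ⟨hk', hks⟩ := hnd
    rw [List.flatMap_cons, List.filter_append, List.filter_filter, ih hks]
    by_cases hkk : k' = k
    · subst hkk
      rw [if_neg hk', if_pos (List.mem_cons_self)]
      simp
    · have h2 : l.filter (fun a => a.1 == k && a.1 == k') = [] := by
        rw [List.filter_eq_nil_iff]; intro a _; simp; omega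
      rw [h2]
      by_cases hm : k ∈ ks <;> simp [List.mem_cons, hm, Ne.symm hkk]

theorem sorted_eq_grp (l : List (Int × Int)) :
    PySem.List.sorted l (fun p => p.1) = grp l := by
  apply stable_unique
  · intro k
    rw [filter_sorted_key]
    unfold grp
    have hperm := PySem.List.sorted_perm (PySem.Set.ofList (l.map Prod.fst)) (fun x : Int => x) false
    have hnd : (PySem.List.sorted (PySem.Set.ofList (l.map Prod.fst)) (fun x : Int => x)).Nodup :=
      hperm.nodup_iff.mpr (PySem.Set.nodup_ofList _)
    rw [filter_flatMap_nodup l _ hnd k]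
    by_cases hm : k ∈ l.map Prod.fst
    · rw [if_pos (by rw [PySem.List.mem_sorted]; exact (PySem.Set.mem_ofList _ _).mpr hm)]
    · rw [if_neg (by rw [PySem.List.mem_sorted]; exact fun h => hm ((PySem.Set.mem_ofList _ _).mp h))]
      rw [List.filter_eq_nil_iff]
      intro a ha hk
      exact hm (List.mem_map.mpr ⟨a, ha, by simpa using hk⟩)
  · exact PySem.List.sorted_pairwise l (fun p => p.1)
  · exact flatMap_filter_pairwise l _ (PySem.List.sorted_ofList_pairwise_lt _)

-- ---- B port evaluates to the grouped form ----
theorem foldl_emit (l : List (Int × Int)) (keys : List Int) :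
    ∀ (acc : List Int × List Int),
    keys.foldl (fun (acc : List Int × List Int) r =>
      (acc.1 ++ List.replicate ((l.filter (fun p => p.1 == r)).map Prod.snd).length r,
       acc.2 ++ (l.filter (fun p => p.1 == r)).map Prod.snd)) acc
    = (acc.1 ++ (keys.flatMap (fun k => l.filter (fun p => p.1 == k))).map Prod.fst,
       acc.2 ++ (keys.flatMap (fun k => l.filter (fun p => p.1 == k))).map Prod.snd) := by
  induction keys with
  | nil => intro acc; simp
  | cons r ks ih =>
    intro acc
    rw [List.foldl_cons, ih]
    have hrep : (l.filter (fun p => p.1 == r)).map Prod.fst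
        = List.replicate ((l.filter (fun p => p.1 == r)).map Prod.snd).length r := by
      rw [List.length_map, List.eq_replicate_iff]
      refine ⟨List.length_map _ , ?_⟩
      intro b hb
      obtain ⟨a, ha, rfl⟩ := List.mem_map.mp hb
      have := (List.mem_filter.mp ha).2
      simpa using this
    simp [hrep, List.flatMap_cons]

theorem alt_eq_grp (rows cols : List Int) :
    sort_row_col_lists_py_alt rows cols
      = ((grp (rows.zip cols)).map Prod.fst, (grp (rows.zip cols)).map Prod.snd) := by
  unfold sort_row_col_lists_py_alt
  have hkeys : PySem.Dict.keys
      ((rows.zip cols).foldl (fun d p => d.modify p.1 [] (fun l => l ++ [p.2])) PySem.Dict.empty)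
      = PySem.Set.ofList ((rows.zip cols).map Prod.fst) := by
    rw [PySem.Dict.keys_foldl_modify_key]
    simp [PySem.Dict.keys_empty, PySem.Set.update_nil_left]
  simp only [PySem.Dict.getD_foldl_modify_append, PySem.Dict.getD_empty, List.nil_append, hkeys]
  rw [foldl_emit]
  unfold grp
  simp

-- ===== VERDICT (by name: the statement is the Claim_ definition above) =====
theorem sort_row_col_lists_py_spec : Claim_equal_sort_row_col_lists_py := by
  intro rows cols _ hpre
  unfold Spec_sort_row_col_lists_py
  rw [alt_eq_grp, ← sorted_eq_grp]
  unfold sort_row_col_lists_py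
  have hlen : PySem.List.len rows = ((rows.length : Nat) : Int) := by
    simp [PySem.List.len]
  rw [hlen, PySem.List.pyRange_zero_natCast,
      sorted_map (fun k : Nat => (k : Int)) (fun i => PySem.List.pyGetD rows i 0),
      zip_eq_map_range rows cols hpre,
      sorted_map (fun j : Nat => (rows.getD j 0, cols.getD j 0)) (fun p => p.1)]
  simp [List.map_map, Function.comp, PySem.List.pyGetD_natCast]
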